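-- pv_equiv track=rewrite | github.com/0xStryK3R/Scaler-DSA-Revision | python/Day-63/HW_3.py | solve
-- ===== SOURCE A (Python) =====
-- def solve(A):
--     cum_xor = 0
--
--     xor_map_freq = {}
--     xor_map_sum = {}
--
--     xor_count = 0
--
--     for i, num in enumerate(A):
--         xor_map_freq[cum_xor] = xor_map_freq.get(cum_xor, 0) + 1
--         xor_map_sum[cum_xor] = xor_map_sum.get(cum_xor, 0) + i
--
--         cum_xor ^= num
--
--         if cum_xor in xor_map_freq:
--             xor_count += i * xor_map_freq[cum_xor] - xor_map_sum[cum_xor]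
--     return xor_count % (10**9 + 7)
-- ===== SOURCE B (Python) =====
-- def solve(A):
--     P = [0]
--     for x in A:
--         P.append(P[-1] ^ x)
--     n = len(A)
--     total = 0
--     for b in range(n + 1):
--         for a in range(b):
--             if P[a] == P[b]:
--                 total += b - a - 1
--     return total % (10**9 + 7)
-- ===== Notes on version B (the rewrite author's own statement) =====
-- stated objective: simpler
-- what changed: replaced the incremental pass with two hash maps (frequency and index-sum per prefix XOR) by a precomputed prefix-XOR list and a direct double loop over all index pairs adding b-a-1 whenever the prefixes match
import Mathlib
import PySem

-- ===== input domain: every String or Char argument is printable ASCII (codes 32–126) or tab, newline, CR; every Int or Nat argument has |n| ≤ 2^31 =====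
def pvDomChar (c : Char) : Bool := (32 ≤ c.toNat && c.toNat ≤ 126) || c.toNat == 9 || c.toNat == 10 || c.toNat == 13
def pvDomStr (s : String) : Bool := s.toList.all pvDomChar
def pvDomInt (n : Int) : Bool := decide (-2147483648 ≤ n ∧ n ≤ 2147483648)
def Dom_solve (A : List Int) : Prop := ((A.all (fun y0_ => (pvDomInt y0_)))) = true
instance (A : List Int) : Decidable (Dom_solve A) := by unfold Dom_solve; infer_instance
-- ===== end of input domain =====

-- B replaces A's incremental pass with two hash maps by a prefix-XOR list and an explicit
-- double loop over all index pairs (plainer and shorter; not faster).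

-- ===== PORT A =====
-- loop body of A's single 'for i, num in enumerate(A)' pass; state = (cum_xor, freq, sum, count)
def stepA (s : Int × PySem.Dict Int Int × PySem.Dict Int Int × Int) (p : Int × Int) :
    Int × PySem.Dict Int Int × PySem.Dict Int Int × Int :=
  let freq := s.2.1.insert s.1 (s.2.1.getD s.1 0 + 1)
  let sum2 := s.2.2.1.insert s.1 (s.2.2.1.getD s.1 0 + p.1)
  let cum := PySem.Int.bxor s.1 p.2
  -- 'xor_map_sum[cum_xor]' is exact as getD: sum2 has a key exactly when freq has it
  let cnt := if freq.contains cum then s.2.2.2 + (p.1 * freq.getD cum 0 - sum2.getD cum 0)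
             else s.2.2.2
  (cum, freq, sum2, cnt)

def solve (A : List Int) : Int :=
  let st := (PySem.List.enumerate A).foldl stepA (0, PySem.Dict.empty, PySem.Dict.empty, 0)
  PySem.Int.mod st.2.2.2 (10 ^ 9 + 7)

-- ===== PORT B =====
def solve_alt (A : List Int) : Int :=
  -- 'P[-1]' is exact as pyGetD with default 0: P is never empty
  let P := A.foldl (fun P x => P ++ [PySem.Int.bxor (PySem.List.pyGetD P (-1) 0) x]) [(0 : Int)]
  let n : Int := A.length
  let total := (PySem.List.pyRange 0 (n + 1) 1).foldl (fun tot b =>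
      (PySem.List.pyRange 0 b 1).foldl (fun tot a =>
        if PySem.List.pyGetD P a 0 = PySem.List.pyGetD P b 0 then tot + (b - a - 1) else tot) tot)
    0
  PySem.Int.mod total (10 ^ 9 + 7)

-- ===== PRECONDITION & SPEC =====
def Spec_solve (A : List Int) (out : Int) : Prop := out = solve_alt A
instance (A : List Int) (out : Int) : Decidable (Spec_solve A out) := by unfold Spec_solve; infer_instance

-- ===== CLAIM (what is proved, stated in full; the proofs are below) =====
def Claim_equal_solve : Prop := ∀ (A : List Int), Dom_solve A → Spec_solve A (solve A)

-- ===== LEMMAS AND PROOFS =====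

/-- prefix XOR of the first `k` elements -/
def pf (A : List Int) (k : Nat) : Int := (A.take k).foldl PySem.Int.bxor 0

/-- contribution of right endpoint `b`: sum over a < b with equal prefix XOR of (b-a-1) -/
def pairSum (A : List Int) (b : Nat) : Int :=
  ((List.range b).map (fun a => if pf A a = pf A b then (b : Int) - a - 1 else 0)).sum

def totalS (A : List Int) : Int := ((List.range (A.length + 1)).map (pairSum A)).sum

/-- number of j < n with pf A j = v -/
def cntv (A : List Int) (n : Nat) (v : Int) : Nat :=
  ((List.range n).filter (fun j => pf A j = v)).length

/-- sum of those j -/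
def idxv (A : List Int) (n : Nat) (v : Int) : Nat :=
  ((List.range n).filter (fun j => pf A j = v)).sum

/-- whether some j < n has pf A j = v -/
def occ (A : List Int) (n : Nat) (v : Int) : Bool :=
  (List.range n).any (fun j => pf A j = v)

def loopA (A : List Int) : Int × PySem.Dict Int Int × PySem.Dict Int Int × Int :=
  (PySem.List.enumerate A).foldl stepA (0, PySem.Dict.empty, PySem.Dict.empty, 0)

theorem pf_append_of_le (A : List Int) (x : Int) {k : Nat} (h : k ≤ A.length) :
    pf (A ++ [x]) k = pf A k := by
  unfold pf
  rw [List.take_append_of_le_length h]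

theorem pf_append_last (A : List Int) (x : Int) :
    pf (A ++ [x]) (A.length + 1) = PySem.Int.bxor (pf A A.length) x := by
  unfold pf
  rw [List.take_of_length_le (by simp), List.take_of_length_le (by simp), List.foldl_append]
  simp

theorem filter_range_pf_append (A : List Int) (x v : Int) :
    (List.range A.length).filter (fun j => pf (A ++ [x]) j = v)
      = (List.range A.length).filter (fun j => pf A j = v) := by
  refine List.filter_congr fun j hj => ?_
  simp [pf_append_of_le A x (le_of_lt (List.mem_range.mp hj))]

theorem cntv_append (A : List Int) (x v : Int) :
    cntv (A ++ [x]) A.length v = cntv A A.length v := by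
  unfold cntv; rw [filter_range_pf_append]

theorem idxv_append (A : List Int) (x v : Int) :
    idxv (A ++ [x]) A.length v = idxv A A.length v := by
  unfold idxv; rw [filter_range_pf_append]

theorem cntv_of_not_occ (A : List Int) (n : Nat) (v : Int) (h : occ A n v = false) :
    cntv A n v = 0 := by
  unfold occ at h
  unfold cntv
  simp only [List.length_eq_zero_iff, List.filter_eq_nil_iff]
  intro j hj
  simp only [List.any_eq_false] at h
  exact h j hj

theorem idxv_of_not_occ (A : List Int) (n : Nat) (v : Int) (h : occ A n v = false) :
    idxv A n v = 0 := by
  unfold occ at h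
  unfold idxv
  have hnil : (List.range n).filter (fun j => pf A j = v) = [] := by
    simp only [List.filter_eq_nil_iff]
    intro j hj
    simp only [List.any_eq_false] at h
    exact h j hj
  rw [hnil]; rfl

theorem occ_eq (A : List Int) (n : Nat) (v : Int) :
    occ A n v = decide (0 < cntv A n v) := by
  cases ho : occ A n v
  · have h0 := cntv_of_not_occ A n v ho
    simp [h0]
  · unfold occ at ho
    simp only [List.any_eq_true] at ho
    obtain ⟨j, hj, hpj⟩ := ho
    have hm : j ∈ (List.range n).filter (fun j => pf A j = v) :=
      List.mem_filter.mpr ⟨hj, hpj⟩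
    have hpos : 0 < cntv A n v := by
      unfold cntv; exact List.length_pos_of_mem hm
    simp [hpos]

theorem occ_append (A : List Int) (x v : Int) :
    occ (A ++ [x]) A.length v = occ A A.length v := by
  rw [occ_eq, occ_eq, cntv_append]

theorem cntv_succ (A : List Int) (n : Nat) (v : Int) :
    cntv A (n + 1) v = cntv A n v + if pf A n = v then 1 else 0 := by
  unfold cntv
  rw [List.range_succ, List.filter_append]
  simp only [List.filter_cons, List.filter_nil, List.length_append]
  split_ifs with h <;> simp_all

theorem idxv_succ (A : List Int) (n : Nat) (v : Int) :
    idxv A (n + 1) v = idxv A n v + if pf A n = v then n else 0 := by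
  unfold idxv
  rw [List.range_succ, List.filter_append]
  simp only [List.filter_cons, List.filter_nil, List.sum_append]
  split_ifs with h <;> simp_all

theorem occ_succ (A : List Int) (n : Nat) (v : Int) :
    occ A (n + 1) v = (occ A n v || decide (pf A n = v)) := by
  unfold occ
  rw [List.range_succ, List.any_append]
  simp

theorem pairSum_append (A : List Int) (x : Int) {b : Nat} (h : b ≤ A.length) :
    pairSum (A ++ [x]) b = pairSum A b := by
  unfold pairSum
  congr 1
  apply List.map_congr_left
  intro a ha
  rw [pf_append_of_le A x h, pf_append_of_le A x (le_trans (le_of_lt (List.mem_range.mp ha)) h)]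

/-- closed form of the weighted sum at a fixed right endpoint -/
theorem sum_ite_sub (q : Nat → Prop) [DecidablePred q] (w : Int) (m : Nat) :
    ((List.range m).map (fun a => if q a then w - a else 0)).sum
      = w * (((List.range m).filter (fun a => q a)).length : Int)
        - (((List.range m).filter (fun a => q a)).sum : Int) := by
  induction m with
  | zero => simp
  | succ m ih =>
    rw [List.range_succ, List.map_append, List.sum_append, List.filter_append, ih]
    by_cases h : q m
    · simp only [List.filter_cons, List.filter_nil, h, decide_true, if_pos, List.map_cons,
        List.map_nil, List.sum_cons, List.sum_nil, List.length_append, List.sum_append,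
        List.length_cons, List.length_nil]
      push_cast
      ring
    · simp [h]

theorem pairSum_last (A : List Int) (x : Int) :
    pairSum (A ++ [x]) (A.length + 1)
      = (A.length : Int) * (cntv (A ++ [x]) (A.length + 1) (pf (A ++ [x]) (A.length + 1)) : Int)
        - (idxv (A ++ [x]) (A.length + 1) (pf (A ++ [x]) (A.length + 1)) : Int) := by
  unfold pairSum cntv idxv
  have hcongr : ((List.range (A.length + 1)).map
      (fun a => if pf (A ++ [x]) a = pf (A ++ [x]) (A.length + 1)
                then ((A.length + 1 : Nat) : Int) - a - 1 else 0))
      = ((List.range (A.length + 1)).map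
      (fun a => if pf (A ++ [x]) a = pf (A ++ [x]) (A.length + 1)
                then (A.length : Int) - a else 0)) := by
    apply List.map_congr_left
    intro a _
    split_ifs with h
    · push_cast; ring
    · rfl
  rw [hcongr, sum_ite_sub (fun a => pf (A ++ [x]) a = pf (A ++ [x]) (A.length + 1))
    (A.length : Int) (A.length + 1)]

theorem totalS_append (A : List Int) (x : Int) :
    totalS (A ++ [x]) = totalS A + pairSum (A ++ [x]) (A.length + 1) := by
  unfold totalS
  rw [List.length_append]
  simp only [List.length_cons, List.length_nil]
  rw [List.range_succ, List.map_append, List.sum_append]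
  congr 1
  · congr 1
    apply List.map_congr_left
    intro b hb
    exact pairSum_append A x (Nat.le_of_lt_succ (List.mem_range.mp hb))
  · simp

/-- characterization of A's loop state -/
theorem loopA_spec (A : List Int) :
    (loopA A).1 = pf A A.length
    ∧ (∀ v, (loopA A).2.1.getD v 0 = (cntv A A.length v : Int))
    ∧ (∀ v, (loopA A).2.2.1.getD v 0 = (idxv A A.length v : Int))
    ∧ (∀ v, (loopA A).2.1.contains v = occ A A.length v)
    ∧ (∀ v, (loopA A).2.2.1.contains v = occ A A.length v)
    ∧ (loopA A).2.2.2 = totalS A := by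
  induction A using List.reverseRecOn with
  | nil =>
    refine ⟨rfl, fun v => ?_, fun v => ?_, fun v => ?_, fun v => ?_, ?_⟩ <;>
      simp [loopA, PySem.List.enumerate_nil, cntv, idxv, occ, totalS, pairSum,
        PySem.Dict.getD_empty, PySem.Dict.contains_empty]
  | append_singleton A x ih =>
    obtain ⟨h1, h2, h3, h4, h5, h6⟩ := ih
    have hloop : loopA (A ++ [x]) = stepA (loopA A) ((A.length : Int), x) := by
      unfold loopA
      rw [PySem.List.enumerate_append, List.foldl_append]
      simp [PySem.List.enumerate_cons, PySem.List.enumerate_nil]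
    have hlen : (A ++ [x]).length = A.length + 1 := by simp
    -- new cumulative xor
    have hcum : (stepA (loopA A) ((A.length : Int), x)).1 = pf (A ++ [x]) (A.length + 1) := by
      simp only [stepA, h1, pf_append_last]
    -- new frequency map
    have hfreq : ∀ v, (stepA (loopA A) ((A.length : Int), x)).2.1.getD v 0
        = (cntv (A ++ [x]) (A.length + 1) v : Int) := by
      intro v
      simp only [stepA]
      rw [PySem.Dict.getD_insert, cntv_succ, cntv_append, pf_append_of_le A x le_rfl,
        h1, h2, h2]
      by_cases hv : v = pf A A.length
      · subst hv
        rw [if_pos rfl, if_pos rfl]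
        push_cast; ring
      · rw [if_neg hv, if_neg (fun h => hv h.symm)]
        push_cast; ring
    -- new index-sum map
    have hsum : ∀ v, (stepA (loopA A) ((A.length : Int), x)).2.2.1.getD v 0
        = (idxv (A ++ [x]) (A.length + 1) v : Int) := by
      intro v
      simp only [stepA]
      rw [PySem.Dict.getD_insert, idxv_succ, idxv_append, pf_append_of_le A x le_rfl,
        h1, h3, h3]
      by_cases hv : v = pf A A.length
      · subst hv
        rw [if_pos rfl, if_pos rfl]
        push_cast; ring
      · rw [if_neg hv, if_neg (fun h => hv h.symm)]
        push_cast; ring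
    -- new contains (both maps)
    have hocc : ∀ v, (stepA (loopA A) ((A.length : Int), x)).2.1.contains v
        = occ (A ++ [x]) (A.length + 1) v := by
      intro v
      simp only [stepA]
      rw [PySem.Dict.contains_insert, occ_succ, occ_append, pf_append_of_le A x le_rfl,
        h1, h4]
      by_cases hv : v = pf A A.length
      · subst hv; simp
      · have hv' : ¬ (pf A A.length = v) := fun h => hv h.symm
        simp [hv, hv']
    have hocc2 : ∀ v, (stepA (loopA A) ((A.length : Int), x)).2.2.1.contains v
        = occ (A ++ [x]) (A.length + 1) v := by
      intro v
      simp only [stepA]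
      rw [PySem.Dict.contains_insert, occ_succ, occ_append, pf_append_of_le A x le_rfl,
        h1, h5]
      by_cases hv : v = pf A A.length
      · subst hv; simp
      · have hv' : ¬ (pf A A.length = v) := fun h => hv h.symm
        simp [hv, hv']
    -- new count
    have hcnt : (stepA (loopA A) ((A.length : Int), x)).2.2.2 = totalS (A ++ [x]) := by
      have e1 : (stepA (loopA A) ((A.length : Int), x)).2.2.2
          = if (stepA (loopA A) ((A.length : Int), x)).2.1.contains
                (stepA (loopA A) ((A.length : Int), x)).1 then
              (loopA A).2.2.2 + ((A.length : Int) *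
                (stepA (loopA A) ((A.length : Int), x)).2.1.getD
                  (stepA (loopA A) ((A.length : Int), x)).1 0
                - (stepA (loopA A) ((A.length : Int), x)).2.2.1.getD
                  (stepA (loopA A) ((A.length : Int), x)).1 0)
            else (loopA A).2.2.2 := rfl
      rw [e1, hcum, hocc (pf (A ++ [x]) (A.length + 1)), hfreq, hsum, h6,
        totalS_append, pairSum_last]
      by_cases ho : occ (A ++ [x]) (A.length + 1) (pf (A ++ [x]) (A.length + 1)) = true
      · rw [if_pos ho]
      · rw [if_neg ho]
        have hfalse : occ (A ++ [x]) (A.length + 1) (pf (A ++ [x]) (A.length + 1)) = false := by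
          simpa using ho
        rw [cntv_of_not_occ _ _ _ hfalse, idxv_of_not_occ _ _ _ hfalse]
        push_cast
        ring
    rw [hloop, hlen]
    exact ⟨hcum, hfreq, hsum, hocc, hocc2, hcnt⟩

theorem solve_eq_totalS (A : List Int) : solve A = PySem.Int.mod (totalS A) (10 ^ 9 + 7) := by
  have h := (loopA_spec A).2.2.2.2.2
  unfold loopA at h
  simp only [solve]
  rw [h]

/-- B's prefix list is the map of `pf` over all prefix lengths -/
theorem plist_eq (A : List Int) :
    A.foldl (fun P x => P ++ [PySem.Int.bxor (PySem.List.pyGetD P (-1) 0) x]) [(0 : Int)]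
      = (List.range (A.length + 1)).map (pf A) := by
  induction A using List.reverseRecOn with
  | nil => simp [List.range_succ, pf]
  | append_singleton A x ih =>
    rw [List.foldl_append, ih]
    simp only [List.foldl_cons, List.foldl_nil]
    have hL : List.map (pf A) (List.range (A.length + 1))
        = List.map (pf A) (List.range A.length) ++ [pf A A.length] := by
      rw [List.range_succ, List.map_append]; simp
    rw [hL, PySem.List.pyGetD_neg_one_append_singleton, ← hL]
    have hR : List.map (pf (A ++ [x])) (List.range ((A ++ [x]).length + 1))
        = List.map (pf (A ++ [x])) (List.range (A.length + 1))
          ++ [pf (A ++ [x]) (A.length + 1)] := by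
      simp only [List.length_append, List.length_cons, List.length_nil]
      rw [List.range_succ, List.map_append]; simp
    rw [hR, pf_append_last]
    congr 1
    apply List.map_congr_left
    intro k hk
    exact (pf_append_of_le A x (Nat.lt_succ_iff.mp (List.mem_range.mp hk))).symm

theorem getP (A : List Int) (i : Int) (h0 : 0 ≤ i) (h1 : i < (A.length : Int) + 1) :
    PySem.List.pyGetD ((List.range (A.length + 1)).map (pf A)) i 0 = pf A i.toNat := by
  have hlt : i < (((List.range (A.length + 1)).map (pf A)).length : Int) := by
    rw [List.length_map, List.length_range]; push_cast; omega
  rw [PySem.List.pyGetD_eq_getElem _ 0 h0 hlt]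
  simp [List.getElem_map, List.getElem_range]

theorem solve_alt_eq_totalS (A : List Int) :
    solve_alt A = PySem.Int.mod (totalS A) (10 ^ 9 + 7) := by
  simp only [solve_alt]
  rw [plist_eq]
  have inner : ∀ (b : Int), 0 ≤ b → b < (A.length : Int) + 1 → ∀ (tot : Int),
      (PySem.List.pyRange 0 b 1).foldl (fun tot a =>
        if PySem.List.pyGetD ((List.range (A.length + 1)).map (pf A)) a 0
            = PySem.List.pyGetD ((List.range (A.length + 1)).map (pf A)) b 0
        then tot + (b - a - 1) else tot) tot
      = tot + pairSum A b.toNat := by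
    intro b hb0 hb1 tot
    have hcg : ∀ (acc : Int), ∀ a ∈ PySem.List.pyRange 0 b 1,
        (if PySem.List.pyGetD ((List.range (A.length + 1)).map (pf A)) a 0
            = PySem.List.pyGetD ((List.range (A.length + 1)).map (pf A)) b 0
         then acc + (b - a - 1) else acc)
        = acc + (if pf A a.toNat = pf A b.toNat then b - a - 1 else 0) := by
      intro acc a ha
      obtain ⟨ha0, ha1⟩ := PySem.List.mem_pyRange_one.mp ha
      rw [getP A a ha0 (by omega), getP A b hb0 hb1]
      split_ifs <;> simp
    rw [PySem.List.foldl_congr_mem (PySem.List.pyRange 0 b 1) _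
      (fun acc a => acc + (if pf A a.toNat = pf A b.toNat then b - a - 1 else 0)) tot hcg]
    rw [PySem.List.foldl_add (PySem.List.pyRange 0 b 1)
      (fun a => if pf A a.toNat = pf A b.toNat then b - a - 1 else 0) tot]
    congr 1
    unfold pairSum
    rw [PySem.List.pyRange_one, List.map_map]
    have hsub : (b - 0).toNat = b.toNat := by omega
    rw [hsub]
    congr 1
    apply List.map_congr_left
    intro k hk
    have hkb : k < b.toNat := List.mem_range.mp hk
    simp only [Function.comp_apply, zero_add, Int.toNat_natCast]
    split_ifs with h
    · omega
    · rfl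
  have hcg2 : ∀ (acc : Int), ∀ b ∈ PySem.List.pyRange 0 ((A.length : Int) + 1) 1,
      ((PySem.List.pyRange 0 b 1).foldl (fun tot a =>
        if PySem.List.pyGetD ((List.range (A.length + 1)).map (pf A)) a 0
            = PySem.List.pyGetD ((List.range (A.length + 1)).map (pf A)) b 0
        then tot + (b - a - 1) else tot) acc)
      = acc + pairSum A b.toNat := by
    intro acc b hb
    obtain ⟨hb0, hb1⟩ := PySem.List.mem_pyRange_one.mp hb
    exact inner b hb0 hb1 acc
  rw [PySem.List.foldl_congr_mem (PySem.List.pyRange 0 ((A.length : Int) + 1) 1) _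
    (fun acc b => acc + pairSum A b.toNat) 0 hcg2]
  rw [PySem.List.foldl_add (PySem.List.pyRange 0 ((A.length : Int) + 1) 1)
    (fun b => pairSum A b.toNat) 0]
  rw [zero_add]
  congr 1
  unfold totalS
  rw [PySem.List.pyRange_one, List.map_map]
  have hsub : ((A.length : Int) + 1 - 0).toNat = A.length + 1 := by omega
  rw [hsub]
  congr 1
  apply List.map_congr_left
  intro k _
  simp

-- ===== VERDICT (by name: the statement is the Claim_ definition above) =====
theorem solve_spec : Claim_equal_solve := by
  intro A _
  unfold Spec_solve
  rw [solve_eq_totalS, solve_alt_eq_totalS]
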